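-- pv_equiv track=rewrite | github.com/ExploitDemon/csc110 | attendance_problems/nested_min.py | nested_min
-- ===== SOURCE A (Python) =====
-- def nested_min(numbers):
--     _min = None
--     for i in range(len(numbers)):
--         if not numbers[i]:  # Check if the sublist is empty
--             continue
--         for j in range(len(numbers[i])):
--             if _min is None or numbers[i][j] < _min:
--                 _min = numbers[i][j]
--     return _min
-- ===== SOURCE B (Python) =====
-- def nested_min(numbers):
--     sublist_mins = [min(s) for s in numbers if s]
--     if sublist_mins:
--         return min(sublist_mins)
--     return None
-- ===== Notes on version B (the rewrite author's own statement) =====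
-- stated objective: simpler
-- what changed: Replaces the single index-driven nested scan carrying one running minimum with a two-stage reduction: first the minimum of each non-empty sublist, then the minimum of those minimums.
import Mathlib
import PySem

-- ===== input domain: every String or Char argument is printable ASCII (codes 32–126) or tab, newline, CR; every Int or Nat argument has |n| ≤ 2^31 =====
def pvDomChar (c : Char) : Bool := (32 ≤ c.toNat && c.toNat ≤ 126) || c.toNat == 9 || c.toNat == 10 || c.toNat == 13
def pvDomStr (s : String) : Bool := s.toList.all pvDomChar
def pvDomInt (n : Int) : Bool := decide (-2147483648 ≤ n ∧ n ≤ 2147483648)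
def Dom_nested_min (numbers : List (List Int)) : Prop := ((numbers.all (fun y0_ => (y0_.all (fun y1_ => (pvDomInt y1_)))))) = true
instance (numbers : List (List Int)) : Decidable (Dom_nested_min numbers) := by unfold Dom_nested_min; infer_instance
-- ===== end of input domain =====

-- B replaces A's index-driven nested scan (one running minimum) with a two-stage
-- reduction: minimum of each non-empty sublist, then minimum of those minimums ("simpler").


-- ===== PORT A =====
-- inner loop body: 'if _min is None or numbers[i][j] < _min: _min = numbers[i][j]'
def nestedMinStep (m : Option Int) (x : Int) : Option Int :=
  match m with
  | none => some x
  | some v => if x < v then some x else some v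

-- the two nested for-loops over indices, visiting elements in order; the empty
-- sublist is skipped by 'continue' exactly as in A
def nested_min (numbers : List (List Int)) : Option Int :=
  numbers.foldl (fun m sub => if sub.isEmpty then m else sub.foldl nestedMinStep m) none

-- ===== PORT B =====
-- sublist_mins = [min(s) for s in numbers if s]  (min? is none exactly on the empty sublist)
def nested_min_alt (numbers : List (List Int)) : Option Int :=
  let sublist_mins := numbers.filterMap (fun s => PySem.List.min? s (fun x => x))
  match sublist_mins with
  | [] => none
  | _ => PySem.List.min? sublist_mins (fun x => x)

-- ===== PRECONDITION & SPEC =====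
def Spec_nested_min (numbers : List (List Int)) (out : Option Int) : Prop := out = nested_min_alt numbers
instance (numbers : List (List Int)) (out : Option Int) : Decidable (Spec_nested_min numbers out) := by unfold Spec_nested_min; infer_instance

-- ===== CLAIM (what is proved, stated in full; the proofs are below) =====
def Claim_equal_nested_min : Prop := ∀ (numbers : List (List Int)), Dom_nested_min numbers → Spec_nested_min numbers (nested_min numbers)

-- ===== LEMMAS AND PROOFS =====

-- option-level minimum (keeps the left value on ties, matching both programs on Int)
def omin (m n : Option Int) : Option Int :=
  match m, n with
  | none, n => n
  | m, none => m
  | some a, some b => some (min a b)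

theorem foldl_min_pull (t : List Int) (a b : Int) :
    t.foldl min (min a b) = min a (t.foldl min b) := by
  induction t generalizing b with
  | nil => rfl
  | cons x t ih =>
    simp only [List.foldl_cons, min_assoc, ih]

theorem foldl_step_some (s : List Int) (v : Int) :
    s.foldl nestedMinStep (some v) = some (s.foldl min v) := by
  induction s generalizing v with
  | nil => rfl
  | cons x t ih =>
    simp only [List.foldl_cons]
    have hstep : nestedMinStep (some v) x = some (min v x) := by
      simp only [nestedMinStep]; split_ifs with h <;> congr 1 <;> omega
    rw [hstep, ih]

theorem min?_id_eq_foldl (s : List Int) :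
    PySem.List.min? s (fun x => x) = s.foldl nestedMinStep none := by
  cases s with
  | nil => rfl
  | cons x t =>
    rw [PySem.List.min?_id_cons]
    simp only [List.foldl_cons, nestedMinStep, foldl_step_some]

theorem foldl_step_omin (s : List Int) (m : Option Int) :
    s.foldl nestedMinStep m = omin m (PySem.List.min? s (fun x => x)) := by
  cases m with
  | none =>
    rw [min?_id_eq_foldl]; cases s <;> rfl
  | some v =>
    cases s with
    | nil => rfl
    | cons x t =>
      rw [PySem.List.min?_id_cons]
      simp only [List.foldl_cons, omin]
      have hstep : nestedMinStep (some v) x = some (min v x) := by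
        simp only [nestedMinStep]; split_ifs with h <;> congr 1 <;> omega
      rw [hstep, foldl_step_some, foldl_min_pull]

theorem omin_assoc (m n p : Option Int) : omin (omin m n) p = omin m (omin n p) := by
  cases m <;> cases n <;> cases p <;> simp [omin, min_assoc]

theorem min?_id_cons_omin (a : Int) (t : List Int) :
    PySem.List.min? (a :: t) (fun x => x) = omin (some a) (PySem.List.min? t (fun x => x)) := by
  cases t with
  | nil => rfl
  | cons x t' =>
    rw [PySem.List.min?_id_cons, PySem.List.min?_id_cons]
    simp only [omin, List.foldl_cons]
    rw [foldl_min_pull]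

theorem main_fold (L : List (List Int)) (m : Option Int) :
    L.foldl (fun m sub => if sub.isEmpty then m else sub.foldl nestedMinStep m) m
      = omin m (PySem.List.min? (L.filterMap (fun s => PySem.List.min? s (fun x => x))) (fun x => x)) := by
  induction L generalizing m with
  | nil => cases m <;> rfl
  | cons s L ih =>
    simp only [List.foldl_cons, List.filterMap_cons]
    cases hs : PySem.List.min? s (fun x => x) with
    | none =>
      have hse : s = [] := (PySem.List.min?_eq_none_iff s (fun x => x)).mp hs
      subst hse
      simpa using ih m
    | some a =>
      have hne : ¬ s.isEmpty := by
        rcases s with _ | ⟨y, t⟩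
        · simp [PySem.List.min?] at hs
        · simp
      rw [if_neg hne, foldl_step_omin, hs, ih, min?_id_cons_omin, omin_assoc]

-- ===== VERDICT (by name: the statement is the Claim_ definition above) =====
theorem nested_min_spec : Claim_equal_nested_min := by
  intro numbers _
  unfold Spec_nested_min nested_min nested_min_alt
  rw [main_fold]
  cases h : numbers.filterMap (fun s => PySem.List.min? s (fun x => x)) with
  | nil => rfl
  | cons a t => simp [omin]
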